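-- pv_equiv track=rewrite | github.com/peterg4a/Chess_Project | USACO/non-transitive_device.py | calc
-- ===== SOURCE A (Python) =====
-- def calc(dice1, dice2):
--     W = 0
--     L = 0
--     for i in range(4):
--         x = dice1[i]
--         for j in range(4):
--             if x > dice2[j]:
--                 W += 1
--             if x < dice2[j]:
--                 L += 1
--     if W > L:
--         return True
--     else:
--         return False
-- ===== SOURCE B (Python) =====
-- def count_le(s, x, strict):
--     """Count elements of the sorted list s that are < x (if strict) or <= x, by binary split."""
--     if not s:
--         return 0
--     m = len(s) // 2
--     hit = s[m] < x if strict else s[m] <= x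
--     if hit:
--         return m + 1 + count_le(s[m + 1:], x, strict)
--     return count_le(s[:m], x, strict)
--
--
-- def calc(dice1, dice2):
--     s2 = sorted((dice2[0], dice2[1], dice2[2], dice2[3]))
--     n = len(s2)
--     W = 0
--     L = 0
--     for x in (dice1[0], dice1[1], dice1[2], dice1[3]):
--         W += count_le(s2, x, True)          # faces of dice2 strictly below x -> wins
--         L += n - count_le(s2, x, False)     # faces of dice2 strictly above x -> losses
--     return W > L
-- ===== Notes on version B (the rewrite author's own statement) =====
-- stated objective: alternative
-- what changed: Instead of comparing all 16 face pairs with nested loops, B sorts dice2 once and for each face of dice1 counts strictly-smaller and strictly-larger faces with a recursive binary split (hand-written bisect), accumulating wins and losses from the returned ranks.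
import Mathlib
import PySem

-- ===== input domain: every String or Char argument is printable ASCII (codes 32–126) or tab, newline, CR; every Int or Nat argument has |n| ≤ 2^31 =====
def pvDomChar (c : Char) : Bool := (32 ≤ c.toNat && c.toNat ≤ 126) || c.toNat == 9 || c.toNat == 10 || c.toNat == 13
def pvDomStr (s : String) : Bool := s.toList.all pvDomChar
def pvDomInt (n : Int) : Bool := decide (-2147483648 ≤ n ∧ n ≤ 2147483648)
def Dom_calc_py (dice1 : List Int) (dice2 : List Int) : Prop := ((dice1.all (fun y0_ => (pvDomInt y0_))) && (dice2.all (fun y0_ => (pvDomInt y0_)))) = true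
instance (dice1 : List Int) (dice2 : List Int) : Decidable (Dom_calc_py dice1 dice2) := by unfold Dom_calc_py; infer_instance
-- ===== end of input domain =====

-- B sorts dice2 once and ranks each face of dice1 in it by a recursive binary split,
-- instead of A's nested all-pairs comparison loops (alternative algorithm, same result).

-- ===== PORT A =====
-- literal port of A: W/L counters threaded through nested index loops over range(4);
-- pyGet? models dice[i] (none = IndexError, carried by the Option state)
def calc_py (dice1 : List Int) (dice2 : List Int) : Bool :=
  let res : Option (Int × Int) :=
    (PySem.List.pyRange 0 4 1).foldl (fun acc i =>
      acc.bind fun WL =>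
        (PySem.List.pyGet? dice1 i).bind fun x =>
          (PySem.List.pyRange 0 4 1).foldl (fun acc2 j =>
            acc2.bind fun WL2 =>
              (PySem.List.pyGet? dice2 j).map fun y =>
                ((if x > y then WL2.1 + 1 else WL2.1),
                 (if x < y then WL2.2 + 1 else WL2.2))) (some WL)) (some ((0 : Int), (0 : Int)))
  match res with
  | some (W, L) => if W > L then true else false
  | none => false

-- ===== PORT B =====
-- port of Source B's count_le: recursive binary split on a sorted list; the slices
-- s[m+1:] and s[:m] (nonnegative bounds) are exactly List.drop/List.take
-- (PySem.List.slice_from_natCast / slice_to_natCast), m = len(s)//2 is Nat division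
def count_le_py (s : List Int) (x : Int) (strict : Bool) : Int :=
  if hs : s = [] then 0
  else
    have hm : s.length / 2 < s.length :=
      Nat.div_lt_self (List.length_pos_of_ne_nil hs) (by omega)
    if (if strict then decide (s[s.length / 2] < x) else decide (s[s.length / 2] ≤ x)) then
      ((s.length / 2 : Nat) : Int) + 1 + count_le_py (s.drop (s.length / 2 + 1)) x strict
    else count_le_py (s.take (s.length / 2)) x strict
termination_by s.length
decreasing_by
  · simp only [List.length_drop]; omega
  · simp only [List.length_take]; omega

-- literal port of B's calc: sort the four faces of dice2 (pyGet? = indexing, none = IndexError),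
-- then one pass over the four faces of dice1 accumulating wins (rank below x) and losses (faces above x)
def calc_py_alt (dice1 : List Int) (dice2 : List Int) : Bool :=
  match PySem.List.pyGet? dice2 0, PySem.List.pyGet? dice2 1,
        PySem.List.pyGet? dice2 2, PySem.List.pyGet? dice2 3 with
  | some e, some f, some g, some k =>
    let s2 := PySem.List.sorted [e, f, g, k] (fun y => y) false
    let n : Int := s2.length
    match PySem.List.pyGet? dice1 0, PySem.List.pyGet? dice1 1,
          PySem.List.pyGet? dice1 2, PySem.List.pyGet? dice1 3 with
    | some a, some b, some c, some d =>
      let WL := [a, b, c, d].foldl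
          (fun WL x => (WL.1 + count_le_py s2 x true, WL.2 + (n - count_le_py s2 x false)))
          ((0 : Int), (0 : Int))
      decide (WL.1 > WL.2)
    | _, _, _, _ => false
  | _, _, _, _ => false

-- ===== PRECONDITION & SPEC =====
-- A raises IndexError when either list has fewer than 4 elements; Pre_ excludes exactly those.
def Pre_calc_py (dice1 : List Int) (dice2 : List Int) : Prop :=
  4 ≤ dice1.length ∧ 4 ≤ dice2.length
instance (dice1 : List Int) (dice2 : List Int) : Decidable (Pre_calc_py dice1 dice2) := by
  unfold Pre_calc_py; infer_instance
def pvWitness_calc_py : List Int × List Int := ([1, 2, 3, 4], [0, 0, 5, 1])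

def Spec_calc_py (dice1 : List Int) (dice2 : List Int) (out : Bool) : Prop := out = calc_py_alt dice1 dice2
instance (dice1 : List Int) (dice2 : List Int) (out : Bool) : Decidable (Spec_calc_py dice1 dice2 out) := by unfold Spec_calc_py; infer_instance

-- ===== CLAIM (what is proved, stated in full; the proofs are below) =====
def Claim_equal_calc_py : Prop := ∀ (dice1 : List Int) (dice2 : List Int), Dom_calc_py dice1 dice2 → Pre_calc_py dice1 dice2 → Spec_calc_py dice1 dice2 (calc_py dice1 dice2)

-- ===== LEMMAS AND PROOFS =====

-- the comparison used by count_le_py is downward closed in its argument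
theorem pv_p_mono (strict : Bool) (x y y' : Int) (h : y ≤ y')
    (h' : (if strict then decide (y' < x) else decide (y' ≤ x)) = true) :
    (if strict then decide (y < x) else decide (y ≤ x)) = true := by
  cases strict <;> simp_all <;> omega

theorem pv_p_anti (strict : Bool) (x y y' : Int) (h : y ≤ y')
    (h' : (if strict then decide (y < x) else decide (y ≤ x)) ≠ true) :
    (if strict then decide (y' < x) else decide (y' ≤ x)) ≠ true := by
  cases strict <;> simp_all <;> omega

-- the binary split on a sorted list counts exactly the elements satisfying the
-- (downward-closed) comparison: < x when strict, ≤ x otherwise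
theorem count_le_py_eq (x : Int) (strict : Bool) :
    ∀ (N : Nat) (s : List Int), s.length ≤ N → s.Sorted (· ≤ ·) →
      count_le_py s x strict =
        ((s.countP (fun y => if strict then decide (y < x) else decide (y ≤ x))) : Int) := by
  intro N
  induction N with
  | zero =>
    intro s hlen _
    have : s = [] := List.length_eq_zero_iff.mp (Nat.le_zero.mp hlen)
    subst this
    simp [count_le_py]
  | succ N ih =>
    intro s hlen hsort
    by_cases hs : s = []
    · subst hs; simp [count_le_py]
    · rw [count_le_py]
      simp only [hs, dite_false]
      set p : Int → Bool := fun y => if strict then decide (y < x) else decide (y ≤ x) with hp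
      have hm : s.length / 2 < s.length :=
        Nat.div_lt_self (List.length_pos_of_ne_nil hs) (by omega)
      set m : Nat := s.length / 2 with hmdef
      have hpair : ∀ i j (hi : i < s.length) (hj : j < s.length), i < j → s[i] ≤ s[j] :=
        fun i j hi hj hij => (List.pairwise_iff_getElem.mp hsort) i j hi hj hij
      by_cases hhit : (if strict then decide (s[m]'hm < x) else decide (s[m]'hm ≤ x)) = true
      · -- s[m] satisfies p: everything up to index m does too
        rw [if_pos hhit]
        have hdropSorted : (s.drop (m + 1)).Sorted (· ≤ ·) :=
          hsort.sublist (List.drop_sublist _ _)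
        have hdlen : (s.drop (m + 1)).length ≤ N := by
          simp only [List.length_drop]; omega
        rw [ih _ hdlen hdropSorted]
        -- split the count of s at index m+1
        have hsplit : s.countP p =
            (s.take (m + 1)).countP p + (s.drop (m + 1)).countP p := by
          conv_lhs => rw [← List.take_append_drop (m + 1) s]
          rw [List.countP_append]
        have htake : (s.take (m + 1)).countP p = m + 1 := by
          have hall : ∀ y ∈ s.take (m + 1), p y = true := by
            intro y hy
            obtain ⟨i, hi, hyi⟩ := List.mem_iff_getElem.mp hy
            have hi' : i < m + 1 := by
              have := hi; simp only [List.length_take] at this; omega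
            have hilen : i < s.length := by omega
            have hgy : y = s[i]'hilen := by
              rw [← hyi]; exact List.getElem_take
            have hle : s[i]'hilen ≤ s[m]'hm := by
              rcases Nat.lt_or_ge i m with h | h
              · exact hpair i m hilen hm h
              · have : i = m := by omega
                subst this; exact le_refl _
            rw [hgy, hp]
            exact pv_p_mono strict x _ _ hle hhit
          calc (s.take (m + 1)).countP p = (s.take (m + 1)).length :=
                List.countP_eq_length.mpr hall
            _ = m + 1 := by simp only [List.length_take]; omega
        rw [hsplit, htake]
        omega
      · -- s[m] fails p: nothing from index m on satisfies p
        rw [if_neg hhit]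
        have htakeSorted : (s.take m).Sorted (· ≤ ·) :=
          hsort.sublist (List.take_sublist _ _)
        have htlen : (s.take m).length ≤ N := by
          simp only [List.length_take]; omega
        rw [ih _ htlen htakeSorted]
        have hsplit : s.countP p = (s.take m).countP p + (s.drop m).countP p := by
          conv_lhs => rw [← List.take_append_drop m s]
          rw [List.countP_append]
        have hdrop : (s.drop m).countP p = 0 := by
          rw [List.countP_eq_zero]
          intro y hy
          obtain ⟨i, hi, hyi⟩ := List.mem_iff_getElem.mp hy
          have hilen : m + i < s.length := by
            have := hi; simp only [List.length_drop] at this; omega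
          have hgy : y = s[m + i]'hilen := by
            rw [← hyi, List.getElem_drop]
          have hge : s[m]'hm ≤ s[m + i]'hilen := by
            rcases Nat.eq_zero_or_pos i with h | h
            · subst h; simp
            · exact hpair m (m + i) hm hilen (by omega)
          rw [hgy, hp]
          exact pv_p_anti strict x _ _ hge hhit
        rw [hsplit, hdrop]
        omega

-- dice[i] for the four literal indices A uses, once both lists are split into four heads
theorem pv_get0 (x0 x1 x2 x3 : Int) (t : List Int) :
    PySem.List.pyGet? (x0::x1::x2::x3::t) 0 = some x0 := by
  have h : (0:Int) ≤ (t.length:Int) + 1 + 1 + 1 := by omega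
  simp [PySem.List.pyGet?, PySem.List.pyIdx?, h]

theorem pv_get1 (x0 x1 x2 x3 : Int) (t : List Int) :
    PySem.List.pyGet? (x0::x1::x2::x3::t) 1 = some x1 := by
  have h : (0:Int) ≤ (t.length:Int) + 1 + 1 := by omega
  simp [PySem.List.pyGet?, PySem.List.pyIdx?, h]

theorem pv_get2 (x0 x1 x2 x3 : Int) (t : List Int) :
    PySem.List.pyGet? (x0::x1::x2::x3::t) 2 = some x2 := by
  have h : (2:Int) ≤ (t.length:Int) + 1 + 1 + 1 := by omega
  simp [PySem.List.pyGet?, PySem.List.pyIdx?, h]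

theorem pv_get3 (x0 x1 x2 x3 : Int) (t : List Int) :
    PySem.List.pyGet? (x0::x1::x2::x3::t) 3 = some x3 := by
  have h : (3:Int) ≤ (t.length:Int) + 1 + 1 + 1 := by omega
  simp [PySem.List.pyGet?, PySem.List.pyIdx?, h]

theorem pv_range4 : PySem.List.pyRange 0 4 1 = [0, 1, 2, 3] := by decide

-- pull the +1 out of A's counter updates so both sides become sums of the same 0/1 atoms
theorem pv_push_ite (c : Prop) [Decidable c] (W : Int) :
    (if c then W + 1 else W) = W + (if c then 1 else 0) := by
  split <;> ring

-- 1 - [y ≤ x] = [x < y] over Int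
theorem pv_ite_not_le (x y : Int) :
    (1 : Int) - (if y ≤ x then 1 else 0) = (if x < y then 1 else 0) := by
  by_cases h : y ≤ x
  · simp [h, not_lt_of_ge h]
  · simp [h, lt_of_not_ge h]

theorem pv_ite_prop (P : Prop) [Decidable P] :
    (if P then true else false) = decide P := by
  by_cases h : P <;> simp [h]

theorem pv_exists4 {α : Type} (l : List α) (h : 4 ≤ l.length) :
    ∃ a b c d t, l = a :: b :: c :: d :: t := by
  match l with
  | a :: b :: c :: d :: t => exact ⟨a, b, c, d, t, rfl⟩
  | [] | [_] | [_, _] | [_, _, _] => simp at h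

-- ===== VERDICT (by name: the statement is the Claim_ definition above) =====
theorem calc_py_spec : Claim_equal_calc_py := by
  intro dice1 dice2 _ hp
  obtain ⟨h1, h2⟩ := hp
  obtain ⟨a, b, c, d, t1, rfl⟩ := pv_exists4 dice1 h1
  obtain ⟨e, f, g, k, t2, rfl⟩ := pv_exists4 dice2 h2
  unfold Spec_calc_py calc_py calc_py_alt
  rw [pv_range4]
  simp only [pv_get0, pv_get1, pv_get2, pv_get3]
  set s2 := PySem.List.sorted [e, f, g, k] (fun y => y) false with hs2
  have hperm : s2.Perm [e, f, g, k] := PySem.List.sorted_perm _ _ _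
  have hlen : s2.length = 4 := by rw [hperm.length_eq]; rfl
  have hsort : s2.Sorted (· ≤ ·) := by
    have := PySem.List.sorted_pairwise [e, f, g, k] (fun y => y)
    simpa [List.Sorted, hs2] using this
  have hcount : ∀ (x : Int) (strict : Bool),
      count_le_py s2 x strict =
        (([e, f, g, k].countP (fun y => if strict then decide (y < x) else decide (y ≤ x))) : Int) := by
    intro x strict
    rw [count_le_py_eq x strict s2.length s2 (le_refl _) hsort, hperm.countP_eq]
  simp only [List.foldl, pv_get0, pv_get1, pv_get2, pv_get3, Option.bind, Option.map,
    pv_push_ite, hcount, hlen, List.countP_cons, List.countP_nil, if_true,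
    decide_eq_true_eq, gt_iff_lt]
  rw [pv_ite_prop, decide_eq_decide]
  push_cast
  simp only [decide_eq_true_eq]
  simp only [← pv_ite_not_le]
  constructor <;> intro h <;> linarith
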